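-- pv_equiv track=rewrite | github.com/saxoflowlabs/saxoflow-starter | cool_cli/coolcli/banner.py | fill_letter_interiors
-- ===== SOURCE A (Python) =====
-- def fill_letter_interiors(lines):
--     """
--     Fill the interior spaces of ASCII art letters.
--     Converts hollow letters to solid filled letters.
--     """
--     if not lines:
--         return lines
--
--     # Convert lines to a 2D grid for easier manipulation
--     max_width = max(len(line) for line in lines)
--     grid = []
--     for line in lines:
--         # Pad line to max width and convert to list for mutability
--         padded_line = line.ljust(max_width)
--         grid.append(list(padded_line))
--
--     height = len(grid)
--     width = max_width
--
--     # For each row, fill spaces that are enclosed between non-space characters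
--     for row in range(height):
--         # Find segments between non-space characters and fill them
--         in_letter = False
--         start_fill = -1
--
--         for col in range(width):
--             char = grid[row][col]
--
--             if char != ' ':  # Found a letter character
--                 if not in_letter:
--                     # Starting a new letter segment
--                     in_letter = True
--                     start_fill = col
--                 else:
--                     # We're continuing in a letter or found the end
--                     # Fill the gap between start_fill and current position
--                     if start_fill != -1 and col > start_fill + 1:
--                         for fill_col in range(start_fill + 1, col):
--                             if grid[row][fill_col] == ' ':
--                                 grid[row][fill_col] = '█'  # Use a solid block character
--                     start_fill = col
--             # If we hit a space, we might be in a gap or outside the letter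
--             # We'll continue and let the next non-space character handle filling
--
--     # Also fill vertical gaps within letters
--     for col in range(width):
--         in_letter = False
--         start_fill = -1
--
--         for row in range(height):
--             char = grid[row][col]
--
--             if char != ' ':  # Found a letter character
--                 if not in_letter:
--                     in_letter = True
--                     start_fill = row
--                 else:
--                     # Fill vertical gap
--                     if start_fill != -1 and row > start_fill + 1:
--                         for fill_row in range(start_fill + 1, row):
--                             if grid[fill_row][col] == ' ':
--                                 # Only fill if there are non-spaces on both sides horizontally too
--                                 left_has_char = col > 0 and grid[fill_row][col-1] != ' '
--                                 right_has_char = col < width-1 and grid[fill_row][col+1] != ' '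
--                                 if left_has_char or right_has_char:
--                                     grid[fill_row][col] = '█'
--                     start_fill = row
--
--     # Convert back to strings
--     filled_lines = [''.join(row).rstrip() for row in grid]
--     return filled_lines
-- ===== SOURCE B (Python) =====
-- def fill_letter_interiors(lines):
--     """
--     Fill the interior spaces of ASCII art letters.
--     Converts hollow letters to solid filled letters.
--     """
--     if not lines:
--         return lines
--
--     width = max(len(line) for line in lines)
--     grid = [list(line.ljust(width)) for line in lines]
--
--     # Horizontal: in each row, every space strictly between the first and
--     # last non-space becomes a solid block.
--     for ri in range(len(grid)):
--         row = grid[ri]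
--         marks = [i for i in range(len(row)) if row[i] != ' ']
--         if marks:
--             lo, hi = marks[0], marks[-1]
--             grid[ri] = ['\u2588' if (ch == ' ' and lo < i < hi) else ch
--                         for i, ch in enumerate(row)]
--
--     # Vertical: columns left to right on the updated grid; a space strictly
--     # between the column's first and last non-space is filled when a
--     # horizontal neighbour is non-space.
--     for col in range(width):
--         marks = [r for r in range(len(grid)) if grid[r][col] != ' ']
--         if marks:
--             lo, hi = marks[0], marks[-1]
--             for r in range(lo + 1, hi):
--                 if grid[r][col] == ' ' and (
--                         (col > 0 and grid[r][col - 1] != ' ')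
--                         or (col + 1 < width and grid[r][col + 1] != ' ')):
--                     grid[r][col] = '\u2588'
--
--     return [''.join(row).rstrip() for row in grid]
-- ===== Notes on version B (the rewrite author's own statement) =====
-- stated objective: simpler
-- what changed: Replaces A's in_letter/start_fill state machines (which fill the gap after each consecutive pair of non-space cells) by directly computing each row's/column's first and last non-space index and doing one bounded fill pass between them.
import Mathlib
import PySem

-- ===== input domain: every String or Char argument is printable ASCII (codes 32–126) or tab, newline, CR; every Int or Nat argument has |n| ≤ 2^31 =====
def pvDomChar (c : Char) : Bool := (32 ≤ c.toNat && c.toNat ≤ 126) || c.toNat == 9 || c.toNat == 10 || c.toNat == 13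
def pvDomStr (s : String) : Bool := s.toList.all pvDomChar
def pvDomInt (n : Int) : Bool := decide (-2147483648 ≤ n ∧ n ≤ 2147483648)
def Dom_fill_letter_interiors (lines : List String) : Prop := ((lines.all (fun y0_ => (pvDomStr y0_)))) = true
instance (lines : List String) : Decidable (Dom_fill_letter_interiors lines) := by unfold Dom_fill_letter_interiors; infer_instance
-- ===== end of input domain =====

-- B replaces A's in_letter/start_fill state machines by a direct computation of each
-- row's/column's first and last non-space index followed by one fill pass (objective: simpler).

-- ===== PORT A =====
-- grid[r][c] read with Python's in-range guarantees (both programs only index inside the padded grid)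
def pvGGet (g : List (List Char)) (r c : Nat) : Char := (g.getD r []).getD c ' '
def pvGSet (g : List (List Char)) (r c : Nat) : List (List Char) :=
  g.set r ((g.getD r []).set c '█')

-- the body of A's inner `for col in range(width)` loop, state (in_letter, start_fill, row)
def pvRowStepA (st : Bool × Int × List Char) (col : Nat) : Bool × Int × List Char :=
  if st.2.2.getD col ' ' ≠ ' ' then
    if st.1 = false then (true, (col : Int), st.2.2)
    else
      (true, (col : Int),
        if st.2.1 ≠ -1 ∧ (col : Int) > st.2.1 + 1 then
          (List.range' (st.2.1.toNat + 1) (col - (st.2.1.toNat + 1))).foldl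
            (fun r fc => if r.getD fc ' ' = ' ' then r.set fc '█' else r) st.2.2
        else st.2.2)
  else st

def pvRowPassA (width : Nat) (row : List Char) : List Char :=
  ((List.range width).foldl pvRowStepA (false, -1, row)).2.2

-- the body of A's inner `for row in range(height)` loop of the vertical phase
def pvColStepA (width col : Nat) (st : Bool × Int × List (List Char)) (row : Nat) :
    Bool × Int × List (List Char) :=
  if pvGGet st.2.2 row col ≠ ' ' then
    if st.1 = false then (true, (row : Int), st.2.2)
    else
      (true, (row : Int),
        if st.2.1 ≠ -1 ∧ (row : Int) > st.2.1 + 1 then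
          (List.range' (st.2.1.toNat + 1) (row - (st.2.1.toNat + 1))).foldl
            (fun g fr =>
              if pvGGet g fr col = ' ' then
                if (0 < col ∧ pvGGet g fr (col - 1) ≠ ' ') ∨
                    (col < width - 1 ∧ pvGGet g fr (col + 1) ≠ ' ') then
                  pvGSet g fr col
                else g
              else g) st.2.2
        else st.2.2)
  else st

def pvColPassA (height width : Nat) (g : List (List Char)) (col : Nat) : List (List Char) :=
  ((List.range height).foldl (pvColStepA width col) (false, -1, g)).2.2

def fill_letter_interiors (lines : List String) : List String :=
  if lines.isEmpty then lines
  else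
    let max_width := (lines.map (fun line => line.toList.length)).foldl max 0
    let grid := lines.map (fun line => line.toList ++ List.replicate (max_width - line.toList.length) ' ')
    let height := grid.length
    let width := max_width
    let grid1 := grid.map (pvRowPassA width)
    let grid2 := (List.range width).foldl (pvColPassA height width) grid1
    grid2.map (fun row => PySem.Str.rstrip (String.ofList row))

-- ===== PORT B =====
def pvRowFillB (row : List Char) : List Char :=
  let marks := (List.range row.length).filter (fun i => decide (row.getD i ' ' ≠ ' '))
  if marks.isEmpty then row
  else
    row.mapIdx (fun i ch =>
      if ch = ' ' ∧ marks.headD 0 < i ∧ i < marks.getLastD 0 then '█' else ch)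

def pvColFillB (width : Nat) (g : List (List Char)) (col : Nat) : List (List Char) :=
  let marks := (List.range g.length).filter (fun r => decide (pvGGet g r col ≠ ' '))
  if marks.isEmpty then g
  else
    (List.range' (marks.headD 0 + 1) (marks.getLastD 0 - (marks.headD 0 + 1))).foldl
      (fun g' r =>
        if pvGGet g' r col = ' ' ∧
            ((0 < col ∧ pvGGet g' r (col - 1) ≠ ' ') ∨
              (col + 1 < width ∧ pvGGet g' r (col + 1) ≠ ' ')) then
          pvGSet g' r col
        else g') g

def fill_letter_interiors_alt (lines : List String) : List String :=
  if lines.isEmpty then lines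
  else
    let width := (lines.map (fun line => line.toList.length)).foldl max 0
    let grid := lines.map (fun line => line.toList ++ List.replicate (width - line.toList.length) ' ')
    let grid1 := grid.map pvRowFillB
    let grid2 := (List.range width).foldl (pvColFillB width) grid1
    grid2.map (fun row => PySem.Str.rstrip (String.ofList row))

-- ===== PRECONDITION & SPEC =====
def Spec_fill_letter_interiors (lines : List String) (out : List String) : Prop := out = fill_letter_interiors_alt lines
instance (lines : List String) (out : List String) : Decidable (Spec_fill_letter_interiors lines out) := by unfold Spec_fill_letter_interiors; infer_instance

-- ===== CLAIM (what is proved, stated in full; the proofs are below) =====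
def Claim_equal_fill_letter_interiors : Prop := ∀ (lines : List String), Dom_fill_letter_interiors lines → Spec_fill_letter_interiors lines (fill_letter_interiors lines)

-- ===== LEMMAS AND PROOFS =====

-- "some non-space strictly before/after index i" (row form) and the column forms
abbrev pvBefore (r : List Char) (i : Nat) : Prop := ∃ j < i, r.getD j ' ' ≠ ' '
abbrev pvAfter (r : List Char) (i : Nat) : Prop := ∃ j < r.length, i < j ∧ r.getD j ' ' ≠ ' '
abbrev pvInG (g : List (List Char)) (r c : Nat) : Prop := r < g.length ∧ c < (g.getD r []).length
abbrev pvNb (width : Nat) (g : List (List Char)) (col r : Nat) : Prop :=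
  (0 < col ∧ pvGGet g r (col - 1) ≠ ' ') ∨ (col + 1 < width ∧ pvGGet g r (col + 1) ≠ ' ')
abbrev pvCBefore (g : List (List Char)) (col r : Nat) : Prop := ∃ j < r, pvGGet g j col ≠ ' '
abbrev pvCAfter (g : List (List Char)) (col r : Nat) : Prop :=
  ∃ j < g.length, r < j ∧ pvGGet g j col ≠ ' '

-- the common value of both horizontal passes
def pvPhi (r : List Char) : List Char :=
  r.mapIdx (fun i ch => if ch = ' ' ∧ pvBefore r i ∧ pvAfter r i then '█' else ch)

-- the common value of both vertical passes for one column
def pvPsi (width : Nat) (g : List (List Char)) (col : Nat) : List (List Char) :=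
  g.mapIdx (fun r row =>
    if pvGGet g r col = ' ' ∧ pvInG g r col ∧ pvNb width g col r ∧
        pvCBefore g col r ∧ pvCAfter g col r then row.set col '█' else row)

lemma pvGetDSet {α : Type} (l : List α) (i j : Nat) (v d : α) :
    (l.set i v).getD j d = if i = j ∧ i < l.length then v else l.getD j d := by
  simp only [List.getD_eq_getElem?_getD, List.getElem?_set]
  by_cases h1 : i = j
  · subst h1
    by_cases h2 : i < l.length <;> simp [h2]
  · simp [h1]

lemma pvFillRow (k a : Nat) (r : List Char) :
    (((List.range' a k).foldl
        (fun r fc => if r.getD fc ' ' = ' ' then r.set fc '█' else r) r).length = r.length)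
    ∧ ∀ i, ((List.range' a k).foldl
        (fun r fc => if r.getD fc ' ' = ' ' then r.set fc '█' else r) r).getD i ' ' =
      if a ≤ i ∧ i < a + k ∧ i < r.length ∧ r.getD i ' ' = ' ' then '█' else r.getD i ' ' := by
  induction k generalizing a r with
  | zero =>
      refine ⟨rfl, fun i => ?_⟩
      rw [if_neg (by omega)]; rfl
  | succ k ih =>
      rw [List.range'_succ, List.foldl_cons]
      set r1 := if r.getD a ' ' = ' ' then r.set a '█' else r with hr1
      have hlen1 : r1.length = r.length := by
        rw [hr1]; split <;> simp
      have hget1 : ∀ i, r1.getD i ' ' =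
          if a = i ∧ a < r.length ∧ r.getD a ' ' = ' ' then '█' else r.getD i ' ' := by
        intro i
        rw [hr1]
        split
        · rename_i hsp
          rw [pvGetDSet]
          by_cases hc : a = i ∧ a < r.length
          · rw [if_pos hc, if_pos ⟨hc.1, hc.2, hsp⟩]
          · rw [if_neg hc, if_neg (by tauto)]
        · rename_i hsp
          rw [if_neg (by tauto)]
      obtain ⟨ihl, ihg⟩ := ih (a + 1) r1
      refine ⟨by rw [ihl, hlen1], fun i => ?_⟩
      rw [ihg i, hlen1]
      by_cases hia : i = a
      · subst hia
        rw [if_neg (by omega), hget1 i]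
        by_cases hc : i < r.length ∧ r.getD i ' ' = ' '
        · rw [if_pos ⟨rfl, hc⟩, if_pos ⟨le_refl i, by omega, hc⟩]
        · rw [if_neg (by tauto), if_neg (by intro h; exact hc ⟨h.2.2.1, h.2.2.2⟩)]
      · have hg1 : r1.getD i ' ' = r.getD i ' ' := by
          rw [hget1 i, if_neg (by tauto)]
        rw [hg1]
        by_cases hc : a ≤ i ∧ i < a + (k + 1) ∧ i < r.length ∧ r.getD i ' ' = ' '
        · rw [if_pos hc, if_pos ⟨by omega, by omega, hc.2.2⟩]
        · rw [if_neg hc, if_neg (by intro h; exact hc ⟨by omega, by omega, h.2.2⟩)]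

lemma pvHeadDMem {l : List Nat} (h : l ≠ []) (d : Nat) : l.headD d ∈ l := by
  cases l with
  | nil => exact absurd rfl h
  | cons a t => simp

lemma pvGetLastDMem {l : List Nat} (h : l ≠ []) (d : Nat) : l.getLastD d ∈ l := by
  induction l generalizing d with
  | nil => exact absurd rfl h
  | cons a t ih =>
      rw [List.getLastD_cons]
      cases t with
      | nil => simp
      | cons b u => exact List.mem_cons_of_mem a (ih (by simp) a)

lemma pvSortedHeadLe {l : List Nat} (h : l.Pairwise (· < ·)) (x : Nat) (hx : x ∈ l) (d : Nat) :
    l.headD d ≤ x := by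
  cases l with
  | nil => simp at hx
  | cons a t =>
      rcases List.mem_cons.mp hx with rfl | hxt
      · simp
      · exact le_of_lt ((List.pairwise_cons.mp h).1 x hxt)

lemma pvSortedLeLast {l : List Nat} (h : l.Pairwise (· < ·)) (x : Nat) (hx : x ∈ l) (d : Nat) :
    x ≤ l.getLastD d := by
  induction l generalizing d with
  | nil => simp at hx
  | cons a t ih =>
      rw [List.getLastD_cons]
      rcases List.mem_cons.mp hx with rfl | hxt
      · cases t with
        | nil => simp
        | cons b u =>
            have hm := pvGetLastDMem (l := b :: u) (by simp) x
            exact le_of_lt ((List.pairwise_cons.mp h).1 _ hm)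
      · exact ih (List.Pairwise.of_cons h) hxt a

lemma pvRowInv (r : List Char) (n : Nat) (hn : n ≤ r.length) :
    (((List.range n).foldl pvRowStepA (false, -1, r)).1 = true ↔ ∃ j < n, r.getD j ' ' ≠ ' ')
    ∧ (((List.range n).foldl pvRowStepA (false, -1, r)).1 = true →
        ∃ m : Nat, ((List.range n).foldl pvRowStepA (false, -1, r)).2.1 = (m : Int) ∧ m < n ∧
          r.getD m ' ' ≠ ' ' ∧ ∀ j, m < j → j < n → r.getD j ' ' = ' ')
    ∧ ((List.range n).foldl pvRowStepA (false, -1, r)).2.2.length = r.length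
    ∧ ∀ i, ((List.range n).foldl pvRowStepA (false, -1, r)).2.2.getD i ' ' =
        if r.getD i ' ' = ' ' ∧ pvBefore r i ∧ (∃ j < n, i < j ∧ r.getD j ' ' ≠ ' ')
        then '█' else r.getD i ' ' := by
  induction n with
  | zero =>
      refine ⟨by simp, by simp, rfl, fun i => ?_⟩
      rw [if_neg (by rintro ⟨-, -, j, hj, -⟩; omega)]
      rfl
  | succ n ih =>
      obtain ⟨h1, h2, h3, h4⟩ := ih (by omega)
      set st := (List.range n).foldl pvRowStepA (false, -1, r) with hst
      have hcell : st.2.2.getD n ' ' = r.getD n ' ' := by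
        rw [h4 n, if_neg (by rintro ⟨-, -, j, hj, hij, -⟩; omega)]
      rw [List.range_succ, List.foldl_append, List.foldl_cons, List.foldl_nil, ← hst]
      by_cases hsp : r.getD n ' ' = ' '
      · -- space at n: step is the identity
        have hstep : pvRowStepA st n = st := by
          unfold pvRowStepA
          rw [if_neg (by rw [hcell]; simpa using hsp)]
        rw [hstep]
        refine ⟨?_, ?_, h3, fun i => ?_⟩
        · rw [h1]
          constructor
          · rintro ⟨j, hj, hm⟩; exact ⟨j, by omega, hm⟩
          · rintro ⟨j, hj, hm⟩
            refine ⟨j, ?_, hm⟩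
            rcases Nat.lt_succ_iff_lt_or_eq.mp hj with h | h
            · exact h
            · subst h; exact absurd hsp hm
        · intro hb
          obtain ⟨m, hm1, hm2, hm3, hm4⟩ := h2 hb
          exact ⟨m, hm1, by omega, hm3, fun j hj1 hj2 => by
            rcases Nat.lt_succ_iff_lt_or_eq.mp hj2 with h | h
            · exact hm4 j hj1 h
            · subst h; exact hsp⟩
        · rw [h4 i]
          by_cases hc : r.getD i ' ' = ' ' ∧ pvBefore r i ∧ (∃ j < n, i < j ∧ r.getD j ' ' ≠ ' ')
          · rw [if_pos hc, if_pos ⟨hc.1, hc.2.1, by obtain ⟨j, hj, hij, hm⟩ := hc.2.2; exact ⟨j, by omega, hij, hm⟩⟩]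
          · rw [if_neg hc, if_neg ?_]
            rintro ⟨ha, hb, j, hj, hij, hm⟩
            refine hc ⟨ha, hb, j, ?_, hij, hm⟩
            rcases Nat.lt_succ_iff_lt_or_eq.mp hj with h | h
            · exact h
            · subst h; exact absurd hsp hm
      · -- non-space at n
        by_cases hb : st.1 = false
        · -- first mark
          have hnomark : ¬ ∃ j < n, r.getD j ' ' ≠ ' ' := by
            rw [← h1]; simp [hb]
          have hstep : pvRowStepA st n = (true, (n : Int), st.2.2) := by
            unfold pvRowStepA
            rw [if_pos (by rw [hcell]; simpa using hsp), if_pos hb]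
          rw [hstep]
          refine ⟨by simp; exact ⟨n, by omega, hsp⟩, ?_, h3, fun i => ?_⟩
          · intro _
            exact ⟨n, rfl, by omega, hsp, fun j hj1 hj2 => by omega⟩
          · simp only
            rw [h4 i]
            rw [if_neg (by rintro ⟨-, -, j, hj, hij, hm⟩; exact hnomark ⟨j, hj, hm⟩),
              if_neg ?_]
            rintro ⟨ha, ⟨j0, hj0, hm0⟩, j, hj, hij, hm⟩
            rcases Nat.lt_or_ge j0 n with h | h
            · exact hnomark ⟨j0, h, hm0⟩
            · -- j0 ≥ n, j0 < i, j ≤ n, i < j : impossible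
              omega
        · -- continuing: fill between last mark m and n
          have hb' : st.1 = true := by
            cases hq : st.1
            · exact absurd hq hb
            · rfl
          obtain ⟨m, hm1, hm2, hm3, hm4⟩ := h2 hb'
          have htn : st.2.1.toNat = m := by rw [hm1]; simp
          -- the new row equals the fill of st.2.2 over [m+1, n)
          have hstep : pvRowStepA st n = (true, (n : Int),
              (List.range' (m + 1) (n - (m + 1))).foldl
                (fun r fc => if r.getD fc ' ' = ' ' then r.set fc '█' else r) st.2.2) := by
            unfold pvRowStepA
            rw [if_pos (by rw [hcell]; simpa using hsp), if_neg (by simp [hb'])]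
            by_cases hg : st.2.1 ≠ -1 ∧ (n : Int) > st.2.1 + 1
            · rw [if_pos hg, htn]
            · rw [if_neg hg]
              have : n - (m + 1) = 0 := by
                rw [hm1] at hg
                omega
              rw [this]
              rfl
          rw [hstep]
          obtain ⟨hfl, hfg⟩ := pvFillRow (n - (m + 1)) (m + 1) st.2.2
          refine ⟨by simp; exact ⟨n, by omega, hsp⟩, ?_, by rw [hfl, h3], fun i => ?_⟩
          · intro _
            exact ⟨n, rfl, by omega, hsp, fun j hj1 hj2 => by omega⟩
          · simp only
            rw [hfg i, h3, h4 i]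
            by_cases hcn : r.getD i ' ' = ' ' ∧ pvBefore r i ∧ (∃ j < n, i < j ∧ r.getD j ' ' ≠ ' ')
            · -- already filled before this step
              rw [if_pos hcn, if_neg (by simp), if_pos ⟨hcn.1, hcn.2.1, by
                  obtain ⟨j, hj, hij, hm⟩ := hcn.2.2; exact ⟨j, by omega, hij, hm⟩⟩]
            · rw [if_neg hcn]
              by_cases hwin : m + 1 ≤ i ∧ i < m + 1 + (n - (m + 1)) ∧ i < r.length ∧ r.getD i ' ' = ' '
              · rw [if_pos hwin, if_pos ⟨hwin.2.2.2, ⟨m, by omega, hm3⟩, ⟨n, by omega, by omega, hsp⟩⟩]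
              · rw [if_neg hwin, if_neg ?_]
                rintro ⟨ha, ⟨j0, hj0, hm0⟩, j, hj, hij, hm⟩
                rcases Nat.lt_succ_iff_lt_or_eq.mp hj with h | h
                · exact hcn ⟨ha, ⟨j0, hj0, hm0⟩, j, h, hij, hm⟩
                · subst h
                  -- j = n, so i < n; show i is in the fill window, contradiction with hwin
                  refine hwin ⟨?_, by omega, by omega, ha⟩
                  -- m < i: if i < m then (i,m) witnesses hcn; i = m contradicts ha
                  rcases Nat.lt_trichotomy i m with h | h | h
                  · exact absurd ⟨ha, ⟨j0, hj0, hm0⟩, ⟨m, hm2, h, hm3⟩⟩ hcn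
                  · subst h; exact absurd ha hm3
                  · omega

lemma pvRowA_eq_phi (r : List Char) : pvRowPassA r.length r = pvPhi r := by
  obtain ⟨-, -, h3, h4⟩ := pvRowInv r r.length (le_refl _)
  unfold pvRowPassA pvPhi
  refine List.ext_getElem (by simpa using h3) ?_
  intro i hi1 hi2
  have hir : i < r.length := by omega
  have hL : ((List.range r.length).foldl pvRowStepA (false, -1, r)).2.2[i] =
      ((List.range r.length).foldl pvRowStepA (false, -1, r)).2.2.getD i ' ' :=
    (List.getD_eq_getElem _ ' ' hi1).symm
  rw [hL, h4 i, List.getElem_mapIdx, List.getD_eq_getElem r ' ' hir]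

lemma pvMarksMem (n : Nat) (q : Nat → Bool) (j : Nat) :
    j ∈ (List.range n).filter q ↔ j < n ∧ q j = true := by
  simp [List.mem_filter, List.mem_range]

lemma pvMarksSorted (n : Nat) (q : Nat → Bool) :
    ((List.range n).filter q).Pairwise (· < ·) :=
  List.Pairwise.filter q List.pairwise_lt_range

lemma pvRowB_eq_phi (r : List Char) : pvRowFillB r = pvPhi r := by
  unfold pvRowFillB pvPhi
  set marks := (List.range r.length).filter (fun i => decide (r.getD i ' ' ≠ ' ')) with hmk
  have hmem : ∀ j, j ∈ marks ↔ j < r.length ∧ r.getD j ' ' ≠ ' ' := by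
    intro j
    rw [hmk, pvMarksMem]
    simp
  have hsor : marks.Pairwise (· < ·) := pvMarksSorted _ _
  by_cases hemp : marks.isEmpty
  · rw [if_pos hemp]
    have hnom : ∀ j, ¬ (j < r.length ∧ r.getD j ' ' ≠ ' ') := by
      intro j hj
      have := (hmem j).mpr hj
      rw [List.isEmpty_iff.mp hemp] at this
      simp at this
    refine (List.ext_getElem (by simp) ?_).symm
    intro i hi1 hi2
    rw [List.getElem_mapIdx]
    rw [if_neg ?_]
    rintro ⟨-, -, j, hj, hij, hm⟩
    exact hnom j ⟨hj, hm⟩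
  · rw [if_neg hemp]
    have hne : marks ≠ [] := by simpa [List.isEmpty_iff] using hemp
    have hlo := hmem _ |>.mp (pvHeadDMem hne 0)
    have hhi := hmem _ |>.mp (pvGetLastDMem hne 0)
    refine List.ext_getElem (by simp) ?_
    intro i hi1 hi2
    have hir : i < r.length := by simpa using hi1
    simp only [List.getElem_mapIdx]
    by_cases hsp : r[i] = ' '
    · have hgd : r.getD i ' ' = r[i] := List.getD_eq_getElem r ' ' (by simpa using hi1)
      have hiff1 : marks.headD 0 < i ↔ pvBefore r i := by
        constructor
        · intro h
          exact ⟨marks.headD 0, h, hlo.2⟩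
        · rintro ⟨j, hj, hm⟩
          have : j ∈ marks := (hmem j).mpr ⟨by omega, hm⟩
          exact lt_of_le_of_lt (pvSortedHeadLe hsor j this 0) hj
      have hiff2 : i < marks.getLastD 0 ↔ pvAfter r i := by
        constructor
        · intro h
          exact ⟨marks.getLastD 0, hhi.1, h, hhi.2⟩
        · rintro ⟨j, hj, hij, hm⟩
          have : j ∈ marks := (hmem j).mpr ⟨hj, hm⟩
          exact lt_of_lt_of_le hij (pvSortedLeLast hsor j this 0)
      by_cases hc : marks.headD 0 < i ∧ i < marks.getLastD 0
      · rw [if_pos ⟨hsp, hc⟩, if_pos ⟨hsp, hiff1.mp hc.1, hiff2.mp hc.2⟩]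
      · rw [if_neg (by tauto), if_neg ?_]
        rintro ⟨h1, h2, h3⟩
        exact hc ⟨hiff1.mpr h2, hiff2.mpr h3⟩
    · rw [if_neg (by tauto), if_neg (by tauto)]

lemma pvGSet_length (g : List (List Char)) (r c : Nat) : (pvGSet g r c).length = g.length := by
  simp [pvGSet]

lemma pvGSet_row_length (g : List (List Char)) (r c r' : Nat) :
    ((pvGSet g r c).getD r' []).length = (g.getD r' []).length := by
  unfold pvGSet
  rw [pvGetDSet]
  split
  · rename_i h
    rw [List.length_set, h.1]
  · rfl

lemma pvGGetSet (g : List (List Char)) (r col r' c' : Nat) :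
    pvGGet (pvGSet g r col) r' c' =
      if r = r' ∧ c' = col ∧ pvInG g r col then '█' else pvGGet g r' c' := by
  unfold pvGGet pvGSet
  rw [pvGetDSet]
  by_cases h1 : r = r' ∧ r < g.length
  · obtain ⟨h1a, h1b⟩ := h1
    subst h1a
    rw [if_pos ⟨rfl, h1b⟩, pvGetDSet]
    by_cases h2 : col = c' ∧ col < (g.getD r []).length
    · rw [if_pos h2, if_pos ⟨rfl, h2.1.symm, h1b, h2.2⟩]
    · rw [if_neg h2, if_neg (by rintro ⟨-, h, -, hl⟩; exact h2 ⟨h.symm, hl⟩)]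
  · rw [if_neg h1, if_neg (by rintro ⟨rfl, -, hr, -⟩; exact h1 ⟨rfl, hr⟩)]

lemma pvNb_congr (width col : Nat) (g g' : List (List Char))
    (h : ∀ r c, c ≠ col → pvGGet g' r c = pvGGet g r c) (r : Nat) :
    pvNb width g' col r ↔ pvNb width g col r := by
  unfold pvNb
  constructor
  · rintro (⟨hc, hx⟩ | ⟨hc, hx⟩)
    · exact Or.inl ⟨hc, by rwa [h r (col - 1) (by omega)] at hx⟩
    · exact Or.inr ⟨hc, by rwa [h r (col + 1) (by omega)] at hx⟩
  · rintro (⟨hc, hx⟩ | ⟨hc, hx⟩)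
    · exact Or.inl ⟨hc, by rwa [h r (col - 1) (by omega)]⟩
    · exact Or.inr ⟨hc, by rwa [h r (col + 1) (by omega)]⟩

lemma pvFillCol (width col k a : Nat) (g : List (List Char)) :
    (((List.range' a k).foldl (fun (g' : List (List Char)) (r : Nat) =>
        if pvGGet g' r col = ' ' ∧ pvNb width g' col r then pvGSet g' r col else g') g).length
          = g.length)
    ∧ (∀ r, ((((List.range' a k).foldl (fun (g' : List (List Char)) (r : Nat) =>
        if pvGGet g' r col = ' ' ∧ pvNb width g' col r then pvGSet g' r col else g') g)).getD r []).length
          = (g.getD r []).length)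
    ∧ (∀ r c, c ≠ col → pvGGet ((List.range' a k).foldl (fun (g' : List (List Char)) (r : Nat) =>
        if pvGGet g' r col = ' ' ∧ pvNb width g' col r then pvGSet g' r col else g') g) r c
          = pvGGet g r c)
    ∧ ∀ r, pvGGet ((List.range' a k).foldl (fun (g' : List (List Char)) (r : Nat) =>
        if pvGGet g' r col = ' ' ∧ pvNb width g' col r then pvGSet g' r col else g') g) r col =
        if a ≤ r ∧ r < a + k ∧ pvInG g r col ∧ pvGGet g r col = ' ' ∧ pvNb width g col r
        then '█' else pvGGet g r col := by
  induction k generalizing a g with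
  | zero =>
      refine ⟨rfl, fun r => rfl, fun r c _ => rfl, fun r => ?_⟩
      rw [if_neg (by omega)]
      rfl
  | succ k ih =>
      rw [List.range'_succ]
      simp only [List.foldl_cons]
      set g1 := if pvGGet g a col = ' ' ∧ pvNb width g col a then pvGSet g a col else g with hg1
      have hlen1 : g1.length = g.length := by
        rw [hg1]; split
        · exact pvGSet_length g a col
        · rfl
      have hrow1 : ∀ r, (g1.getD r []).length = (g.getD r []).length := by
        intro r; rw [hg1]; split
        · exact pvGSet_row_length g a col r
        · rfl
      have hoff1 : ∀ r c, c ≠ col → pvGGet g1 r c = pvGGet g r c := by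
        intro r c hc
        rw [hg1]; split
        · rw [pvGGetSet, if_neg (by tauto)]
        · rfl
      have hcol1 : ∀ r, pvGGet g1 r col =
          if a = r ∧ pvInG g a col ∧ pvGGet g a col = ' ' ∧ pvNb width g col a
          then '█' else pvGGet g r col := by
        intro r
        rw [hg1]; split
        · rename_i hcnd
          rw [pvGGetSet]
          by_cases h : a = r ∧ pvInG g a col
          · rw [if_pos ⟨h.1, rfl, h.2⟩, if_pos ⟨h.1, h.2, hcnd⟩]
          · rw [if_neg (by tauto), if_neg (by tauto)]
        · rename_i hcnd
          rw [if_neg (by tauto)]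
      have hing1 : ∀ r, (pvInG g1 r col ↔ pvInG g r col) := by
        intro r
        unfold pvInG
        rw [hlen1, hrow1]
      obtain ⟨ih1, ih2, ih3, ih4⟩ := ih (a + 1) g1
      refine ⟨by rw [ih1, hlen1], fun r => by rw [ih2, hrow1],
        fun r c hc => by rw [ih3 r c hc, hoff1 r c hc], fun r => ?_⟩
      rw [ih4 r]
      by_cases hra : r = a
      · subst hra
        rw [if_neg (by omega), hcol1 r]
        by_cases hc : pvInG g r col ∧ pvGGet g r col = ' ' ∧ pvNb width g col r
        · rw [if_pos ⟨rfl, hc⟩, if_pos ⟨le_refl r, by omega, hc⟩]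
        · rw [if_neg (by tauto), if_neg (by tauto)]
      · have hg1r : pvGGet g1 r col = pvGGet g r col := by
          rw [hcol1 r, if_neg (by tauto)]
        rw [hg1r]
        have hnb : pvNb width g1 col r ↔ pvNb width g col r := pvNb_congr width col g g1 hoff1 r
        by_cases hc : a ≤ r ∧ r < a + (k + 1) ∧ pvInG g r col ∧ pvGGet g r col = ' ' ∧ pvNb width g col r
        · rw [if_pos ⟨by omega, by omega, (hing1 r).mpr hc.2.2.1, hc.2.2.2.1,
            hnb.mpr hc.2.2.2.2⟩, if_pos hc]
        · rw [if_neg ?_, if_neg hc]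
          rintro ⟨h1, h2, h3, h4, h5⟩
          exact hc ⟨by omega, by omega, (hing1 r).mp h3, h4, hnb.mp h5⟩

-- A's inner vertical fill loop is the canonical conditional fill
lemma pvStepInner_eq (width col : Nat) (l : List Nat) (g : List (List Char)) :
    l.foldl (fun g fr =>
        if pvGGet g fr col = ' ' then
          if (0 < col ∧ pvGGet g fr (col - 1) ≠ ' ') ∨
              (col < width - 1 ∧ pvGGet g fr (col + 1) ≠ ' ') then
            pvGSet g fr col
          else g
        else g) g =
      l.foldl (fun (g' : List (List Char)) (r : Nat) =>
        if pvGGet g' r col = ' ' ∧ pvNb width g' col r then pvGSet g' r col else g') g := by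
  have hf : ∀ (g : List (List Char)) (fr : Nat),
      (if pvGGet g fr col = ' ' then
          if (0 < col ∧ pvGGet g fr (col - 1) ≠ ' ') ∨
              (col < width - 1 ∧ pvGGet g fr (col + 1) ≠ ' ') then pvGSet g fr col else g
        else g) =
      (if pvGGet g fr col = ' ' ∧ pvNb width g col fr then pvGSet g fr col else g) := by
    intro g fr
    have hw : col < width - 1 ↔ col + 1 < width := by omega
    by_cases hsp : pvGGet g fr col = ' '
    · rw [if_pos hsp]
      by_cases hnb : pvNb width g col fr
      · have hnb' : (0 < col ∧ pvGGet g fr (col - 1) ≠ ' ') ∨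
            (col < width - 1 ∧ pvGGet g fr (col + 1) ≠ ' ') := by
          unfold pvNb at hnb; rw [hw]; exact hnb
        rw [if_pos hnb', if_pos ⟨hsp, hnb⟩]
      · have hnb' : ¬ ((0 < col ∧ pvGGet g fr (col - 1) ≠ ' ') ∨
            (col < width - 1 ∧ pvGGet g fr (col + 1) ≠ ' ')) := by
          unfold pvNb at hnb; rw [hw]; exact hnb
        rw [if_neg hnb', if_neg (by tauto)]
    · rw [if_neg hsp, if_neg (by tauto)]
  induction l generalizing g with
  | nil => rfl
  | cons x xs ih =>
      simp only [List.foldl_cons]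
      rw [hf, ih]

lemma pvColInv (width col : Nat) (g : List (List Char)) (n : Nat) (hn : n ≤ g.length) :
    (((List.range n).foldl (pvColStepA width col) (false, -1, g)).1 = true ↔
        ∃ j < n, pvGGet g j col ≠ ' ')
    ∧ (((List.range n).foldl (pvColStepA width col) (false, -1, g)).1 = true →
        ∃ m : Nat, ((List.range n).foldl (pvColStepA width col) (false, -1, g)).2.1 = (m : Int) ∧
          m < n ∧ pvGGet g m col ≠ ' ' ∧ ∀ j, m < j → j < n → pvGGet g j col = ' ')
    ∧ ((List.range n).foldl (pvColStepA width col) (false, -1, g)).2.2.length = g.length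
    ∧ (∀ r, (((List.range n).foldl (pvColStepA width col) (false, -1, g)).2.2.getD r []).length =
        (g.getD r []).length)
    ∧ (∀ r c, c ≠ col →
        pvGGet ((List.range n).foldl (pvColStepA width col) (false, -1, g)).2.2 r c = pvGGet g r c)
    ∧ ∀ r, pvGGet ((List.range n).foldl (pvColStepA width col) (false, -1, g)).2.2 r col =
        if pvGGet g r col = ' ' ∧ pvInG g r col ∧ pvNb width g col r ∧ pvCBefore g col r ∧
            (∃ j < n, r < j ∧ pvGGet g j col ≠ ' ')
        then '█' else pvGGet g r col := by
  induction n with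
  | zero =>
      refine ⟨by simp, by simp, rfl, fun r => rfl, fun r c _ => rfl, fun i => ?_⟩
      rw [if_neg (by rintro ⟨-, -, -, -, j, hj, -⟩; omega)]
      rfl
  | succ n ih =>
      obtain ⟨h1, h2, h3, h4, h5, h6⟩ := ih (by omega)
      set st := (List.range n).foldl (pvColStepA width col) (false, -1, g) with hst
      have hcell : pvGGet st.2.2 n col = pvGGet g n col := by
        rw [h6 n, if_neg (by rintro ⟨-, -, -, -, j, hj, hij, -⟩; omega)]
      rw [List.range_succ, List.foldl_append, List.foldl_cons, List.foldl_nil, ← hst]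
      by_cases hsp : pvGGet g n col = ' '
      · have hstep : pvColStepA width col st n = st := by
          unfold pvColStepA
          rw [if_neg (by rw [hcell]; simpa using hsp)]
        rw [hstep]
        refine ⟨?_, ?_, h3, h4, h5, fun r => ?_⟩
        · rw [h1]
          constructor
          · rintro ⟨j, hj, hm⟩; exact ⟨j, by omega, hm⟩
          · rintro ⟨j, hj, hm⟩
            refine ⟨j, ?_, hm⟩
            rcases Nat.lt_succ_iff_lt_or_eq.mp hj with h | h
            · exact h
            · subst h; exact absurd hsp hm
        · intro hb
          obtain ⟨m, hm1, hm2, hm3, hm4⟩ := h2 hb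
          exact ⟨m, hm1, by omega, hm3, fun j hj1 hj2 => by
            rcases Nat.lt_succ_iff_lt_or_eq.mp hj2 with h | h
            · exact hm4 j hj1 h
            · subst h; exact hsp⟩
        · rw [h6 r]
          by_cases hc : pvGGet g r col = ' ' ∧ pvInG g r col ∧ pvNb width g col r ∧
              pvCBefore g col r ∧ (∃ j < n, r < j ∧ pvGGet g j col ≠ ' ')
          · rw [if_pos hc, if_pos ⟨hc.1, hc.2.1, hc.2.2.1, hc.2.2.2.1, by
              obtain ⟨j, hj, hij, hm⟩ := hc.2.2.2.2; exact ⟨j, by omega, hij, hm⟩⟩]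
          · rw [if_neg hc, if_neg ?_]
            rintro ⟨ha, hb', hnb, hcb, j, hj, hij, hm⟩
            refine hc ⟨ha, hb', hnb, hcb, j, ?_, hij, hm⟩
            rcases Nat.lt_succ_iff_lt_or_eq.mp hj with h | h
            · exact h
            · subst h; exact absurd hsp hm
      · by_cases hb : st.1 = false
        · have hnomark : ¬ ∃ j < n, pvGGet g j col ≠ ' ' := by
            rw [← h1]; simp [hb]
          have hstep : pvColStepA width col st n = (true, (n : Int), st.2.2) := by
            unfold pvColStepA
            rw [if_pos (by rw [hcell]; simpa using hsp), if_pos hb]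
          rw [hstep]
          refine ⟨by simp; exact ⟨n, by omega, hsp⟩, ?_, h3, h4, h5, fun r => ?_⟩
          · intro _
            exact ⟨n, rfl, by omega, hsp, fun j hj1 hj2 => by omega⟩
          · simp only
            rw [h6 r]
            rw [if_neg (by rintro ⟨-, -, -, -, j, hj, hij, hm⟩; exact hnomark ⟨j, hj, hm⟩),
              if_neg ?_]
            rintro ⟨ha, -, -, ⟨j0, hj0, hm0⟩, j, hj, hij, hm⟩
            rcases Nat.lt_or_ge j0 n with h | h
            · exact hnomark ⟨j0, h, hm0⟩
            · omega
        · have hb' : st.1 = true := by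
            cases hq : st.1
            · exact absurd hq hb
            · rfl
          obtain ⟨m, hm1, hm2, hm3, hm4⟩ := h2 hb'
          have htn : st.2.1.toNat = m := by rw [hm1]; simp
          have hstep : pvColStepA width col st n = (true, (n : Int),
              (List.range' (m + 1) (n - (m + 1))).foldl
                (fun (g' : List (List Char)) (r : Nat) =>
                  if pvGGet g' r col = ' ' ∧ pvNb width g' col r then pvGSet g' r col else g')
                st.2.2) := by
            unfold pvColStepA
            rw [if_pos (by rw [hcell]; simpa using hsp), if_neg (by simp [hb'])]
            by_cases hg : st.2.1 ≠ -1 ∧ (n : Int) > st.2.1 + 1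
            · rw [if_pos hg, htn, pvStepInner_eq]
            · rw [if_neg hg]
              have h0 : n - (m + 1) = 0 := by
                rw [hm1] at hg
                omega
              rw [h0]
              rfl
          rw [hstep]
          obtain ⟨hfl, hfr, hfo, hfg⟩ := pvFillCol width col (n - (m + 1)) (m + 1) st.2.2
          have hing : ∀ r, (pvInG st.2.2 r col ↔ pvInG g r col) := by
            intro r
            unfold pvInG
            rw [h3, h4]
          have hnb : ∀ r, (pvNb width st.2.2 col r ↔ pvNb width g col r) :=
            pvNb_congr width col g st.2.2 h5
          refine ⟨by simp; exact ⟨n, by omega, hsp⟩, ?_, by rw [hfl, h3],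
            fun r => by rw [hfr, h4], fun r c hc => by rw [hfo r c hc, h5 r c hc], fun r => ?_⟩
          · intro _
            exact ⟨n, rfl, by omega, hsp, fun j hj1 hj2 => by omega⟩
          · simp only
            rw [hfg r, h6 r]
            by_cases hcn : pvGGet g r col = ' ' ∧ pvInG g r col ∧ pvNb width g col r ∧
                pvCBefore g col r ∧ (∃ j < n, r < j ∧ pvGGet g j col ≠ ' ')
            · rw [if_pos hcn, if_neg (by simp), if_pos ⟨hcn.1, hcn.2.1, hcn.2.2.1, hcn.2.2.2.1, by
                obtain ⟨j, hj, hij, hm⟩ := hcn.2.2.2.2; exact ⟨j, by omega, hij, hm⟩⟩]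
            · rw [if_neg hcn]
              by_cases hwin : m + 1 ≤ r ∧ r < m + 1 + (n - (m + 1)) ∧ pvInG g r col ∧
                  pvGGet g r col = ' ' ∧ pvNb width g col r
              · rw [if_pos ⟨hwin.1, hwin.2.1, (hing r).mpr hwin.2.2.1, hwin.2.2.2.1,
                  (hnb r).mpr hwin.2.2.2.2⟩,
                  if_pos ⟨hwin.2.2.2.1, hwin.2.2.1, hwin.2.2.2.2, ⟨m, by omega, hm3⟩,
                    ⟨n, by omega, by omega, hsp⟩⟩]
              · rw [if_neg (by
                  rintro ⟨hw1, hw2, hw3, hw4, hw5⟩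
                  exact hwin ⟨hw1, hw2, (hing r).mp hw3, hw4, (hnb r).mp hw5⟩), if_neg ?_]
                rintro ⟨ha, hig, hnbr, ⟨j0, hj0, hm0⟩, j, hj, hij, hm⟩
                rcases Nat.lt_succ_iff_lt_or_eq.mp hj with h | h
                · exact hcn ⟨ha, hig, hnbr, ⟨j0, hj0, hm0⟩, j, h, hij, hm⟩
                · subst h
                  refine hwin ⟨?_, by omega, hig, ha, hnbr⟩
                  rcases Nat.lt_trichotomy r m with h | h | h
                  · exact absurd ⟨ha, hig, hnbr, ⟨j0, hj0, hm0⟩, ⟨m, hm2, h, hm3⟩⟩ hcn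
                  · subst h; exact absurd ha hm3
                  · omega

lemma pvMarkLt (g : List (List Char)) (col j : Nat) (h : pvGGet g j col ≠ ' ') : j < g.length := by
  by_contra hc
  apply h
  have hrow : g.getD j [] = [] := List.getD_eq_default _ _ (by omega)
  unfold pvGGet
  rw [hrow]
  rfl

lemma pvGGet_elem (g : List (List Char)) (r c : Nat) (hr : r < g.length)
    (hc : c < (g[r]'hr).length) : (g[r]'hr)[c]'hc = pvGGet g r c := by
  unfold pvGGet
  rw [List.getD_eq_getElem _ [] hr, List.getD_eq_getElem]

lemma pvColA_eq_psi (width col : Nat) (g : List (List Char)) :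
    pvColPassA g.length width g col = pvPsi width g col := by
  obtain ⟨-, -, h3, h4, h5, h6⟩ := pvColInv width col g g.length (le_refl _)
  unfold pvColPassA pvPsi
  refine List.ext_getElem (by rw [h3]; simp) ?_
  intro r hr1 hr2
  have hrg : r < g.length := by rwa [h3] at hr1
  rw [List.getElem_mapIdx]
  have hrowlen : (((List.range g.length).foldl (pvColStepA width col) (false, -1, g)).2.2[r]).length
      = g[r].length := by
    have h := h4 r
    rwa [List.getD_eq_getElem _ [] hr1, List.getD_eq_getElem _ [] hrg] at h
  refine List.ext_getElem (by rw [hrowlen]; split <;> simp) ?_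
  intro c hc1 hc2
  have hcg : c < g[r].length := by rwa [hrowlen] at hc1
  have hLg := pvGGet_elem _ r c hr1 hc1
  have hgg := pvGGet_elem g r c hrg hcg
  by_cases hcc : c = col
  · subst hcc
    rw [hLg, h6 r]
    split
    · rename_i hcond
      have hclen : c < g[r].length := by
        have := hcond.2.1.2
        rwa [List.getD_eq_getElem _ [] hrg] at this
      rw [List.getElem_set_self]
    · rw [hgg]
  · rw [hLg, h5 r c hcc, ← hgg]
    split
    · exact (List.getElem_set_ne (by omega) (by simpa using hcg)).symm
    · rfl

lemma pvColB_eq_psi (width col : Nat) (g : List (List Char)) :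
    pvColFillB width g col = pvPsi width g col := by
  unfold pvColFillB
  set marks := (List.range g.length).filter (fun r => decide (pvGGet g r col ≠ ' ')) with hmk
  have hmem : ∀ j, j ∈ marks ↔ j < g.length ∧ pvGGet g j col ≠ ' ' := by
    intro j
    rw [hmk]
    simp [List.mem_filter, List.mem_range]
  have hsor : marks.Pairwise (· < ·) := pvMarksSorted _ _
  by_cases hemp : marks.isEmpty
  · rw [if_pos hemp]
    have hnom : ∀ j, ¬ (pvGGet g j col ≠ ' ') := by
      intro j hj
      have hmm := (hmem j).mpr ⟨pvMarkLt g col j hj, hj⟩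
      rw [List.isEmpty_iff.mp hemp] at hmm
      simp at hmm
    refine (List.ext_getElem (by simp [pvPsi]) ?_).symm
    intro i hi1 hi2
    unfold pvPsi
    rw [List.getElem_mapIdx, if_neg (by rintro ⟨-, -, -, ⟨j, -, hj⟩, -⟩; exact hnom j hj)]
  · rw [if_neg hemp]
    show (List.range' (marks.headD 0 + 1) (marks.getLastD 0 - (marks.headD 0 + 1))).foldl
      (fun g' r => if pvGGet g' r col = ' ' ∧ pvNb width g' col r then pvGSet g' r col else g') g
      = pvPsi width g col
    have hne : marks ≠ [] := by simpa [List.isEmpty_iff] using hemp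
    have hlo := hmem _ |>.mp (pvHeadDMem hne 0)
    have hhi := hmem _ |>.mp (pvGetLastDMem hne 0)
    set lo := marks.headD 0 with hloD
    set hi := marks.getLastD 0 with hhiD
    obtain ⟨hfl, hfr, hfo, hfg⟩ := pvFillCol width col (hi - (lo + 1)) (lo + 1) g
    have hiff1 : ∀ r, (lo < r ↔ pvCBefore g col r) := by
      intro r
      constructor
      · intro h
        exact ⟨lo, h, hlo.2⟩
      · rintro ⟨j, hj, hm⟩
        have : j ∈ marks := (hmem j).mpr ⟨pvMarkLt g col j hm, hm⟩
        exact lt_of_le_of_lt (pvSortedHeadLe hsor j this 0) hj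
    have hiff2 : ∀ r, (r < hi ↔ pvCAfter g col r) := by
      intro r
      constructor
      · intro h
        exact ⟨hi, hhi.1, h, hhi.2⟩
      · rintro ⟨j, hj, hij, hm⟩
        have : j ∈ marks := (hmem j).mpr ⟨hj, hm⟩
        exact lt_of_lt_of_le hij (pvSortedLeLast hsor j this 0)
    refine List.ext_getElem (by rw [hfl]; simp [pvPsi]) ?_
    intro r hr1 hr2
    have hrg : r < g.length := by rwa [hfl] at hr1
    unfold pvPsi
    rw [List.getElem_mapIdx]
    have hrowlen : ((List.range' (lo + 1) (hi - (lo + 1))).foldl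
        (fun g' r => if pvGGet g' r col = ' ' ∧ pvNb width g' col r then pvGSet g' r col else g') g)[r].length
        = g[r].length := by
      have h := hfr r
      rwa [List.getD_eq_getElem _ [] hr1, List.getD_eq_getElem _ [] hrg] at h
    refine List.ext_getElem (by rw [hrowlen]; split <;> simp) ?_
    intro c hc1 hc2
    have hcg : c < g[r].length := by rwa [hrowlen] at hc1
    have hLg := pvGGet_elem _ r c hr1 hc1
    have hgg := pvGGet_elem g r c hrg hcg
    have hwin : (lo + 1 ≤ r ∧ r < lo + 1 + (hi - (lo + 1))) ↔ (lo < r ∧ r < hi) := by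
      have hlohi : lo ≤ hi := by
        have := pvSortedLeLast hsor lo (pvHeadDMem hne 0) 0
        omega
      omega
    by_cases hcc : c = col
    · subst hcc
      rw [hLg, hfg r]
      by_cases hcond : pvGGet g r c = ' ' ∧ pvInG g r c ∧ pvNb width g c r ∧
          pvCBefore g c r ∧ pvCAfter g c r
      · rw [if_pos (by
          refine ⟨?_, ?_, hcond.2.1, hcond.1, hcond.2.2.1⟩
          · have := (hiff1 r).mpr hcond.2.2.2.1
            omega
          · have h1 := (hiff1 r).mpr hcond.2.2.2.1
            have h2 := (hiff2 r).mpr hcond.2.2.2.2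
            omega)]
        simp only [if_pos hcond]
        rw [List.getElem_set_self]
      · rw [if_neg (by
          rintro ⟨hw1, hw2, hw3, hw4, hw5⟩
          exact hcond ⟨hw4, hw3, hw5, (hiff1 r).mp (by omega), (hiff2 r).mp (hwin.mp ⟨hw1, hw2⟩).2⟩)]
        simp only [if_neg hcond]
        exact hgg.symm
    · rw [hLg, hfo r c hcc, ← hgg]
      split
      · exact (List.getElem_set_ne (by omega) (by simpa using hcg)).symm
      · rfl

lemma pvPsi_length (width : Nat) (g : List (List Char)) (col : Nat) :
    (pvPsi width g col).length = g.length := by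
  simp [pvPsi]

lemma pvFoldCols_eq (width height : Nat) (cols : List Nat) :
    ∀ g : List (List Char), g.length = height →
      cols.foldl (pvColPassA height width) g = cols.foldl (pvColFillB width) g := by
  induction cols with
  | nil => intro g _; rfl
  | cons c cs ih =>
      intro g hg
      have h1 : pvColPassA height width g c = pvColFillB width g c := by
        rw [← hg, pvColA_eq_psi, pvColB_eq_psi]
      simp only [List.foldl_cons, h1]
      exact ih _ (by rw [pvColB_eq_psi, pvPsi_length, hg])

lemma pvGridEq (W : Nat) (G : List (List Char)) (hrows : ∀ r ∈ G, r.length = W) :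
    (List.range W).foldl (pvColPassA G.length W) (G.map (pvRowPassA W)) =
      (List.range W).foldl (pvColFillB W) (G.map pvRowFillB) := by
  have h1 : G.map (pvRowPassA W) = G.map pvRowFillB := by
    apply List.map_congr_left
    intro r hr
    rw [← hrows r hr, pvRowA_eq_phi]
    exact (pvRowB_eq_phi r).symm
  rw [h1]
  exact pvFoldCols_eq W G.length (List.range W) (G.map pvRowFillB) (by simp)

-- ===== VERDICT (by name: the statement is the Claim_ definition above) =====
theorem fill_letter_interiors_spec : Claim_equal_fill_letter_interiors := by
  intro lines _
  unfold Spec_fill_letter_interiors fill_letter_interiors fill_letter_interiors_alt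
  by_cases h : lines.isEmpty
  · rw [if_pos h, if_pos h]
  · rw [if_neg h, if_neg h]
    have hrows : ∀ r ∈ lines.map (fun line =>
        line.toList ++ List.replicate ((lines.map (fun line => line.toList.length)).foldl max 0
          - line.toList.length) ' '),
        r.length = (lines.map (fun line => line.toList.length)).foldl max 0 := by
      intro r hr
      obtain ⟨line, hline, rfl⟩ := List.mem_map.mp hr
      have hle : line.toList.length ≤ (lines.map (fun line => line.toList.length)).foldl max 0 :=
        (PySem.List.le_foldl_max (lines.map (fun line => line.toList.length)) 0).2 _
          (List.mem_map_of_mem hline)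
      simp only [List.length_append, List.length_replicate]
      omega
    exact congrArg (List.map (fun row => PySem.Str.rstrip (String.ofList row)))
      (pvGridEq ((lines.map (fun line => line.toList.length)).foldl max 0)
        (lines.map (fun line =>
          line.toList ++ List.replicate ((lines.map (fun line => line.toList.length)).foldl max 0
            - line.toList.length) ' '))
        hrows)
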